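-- pv_equiv track=rewrite | github.com/Lucasaboredo/PARCIAL-1 | punto_dos.py | contar_descubridores
-- ===== SOURCE A (Python) =====
-- class Stack:
--
--     def __init__(self):
--         self.__elements = []
--
--     def push(self, element):
--         self.__elements.append(element)
--
--     def pop(self):
--         if len(self.__elements) > 0:
--             return self.__elements.pop()
--         else:
--             return None
--
--     def on_top(self):
--         if len(self.__elements) > 0:
--             return self.__elements[-1]
--         else:
--             return None
--
--     def size(self):
--         return len(self.__elements)
--
-- def contar_descubridores(lista):
--     pila = Stack()
--     for dinosaurio in lista:
--         pila.push(dinosaurio)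
--     descubridores = set()
--     while pila.size() > 0:
--         dinosaurio = pila.pop()
--         descubridores.add(dinosaurio["descubridor"])
--     return len(descubridores)
-- ===== SOURCE B (Python) =====
-- def contar_descubridores(lista):
--     return len({dinosaurio["descubridor"] for dinosaurio in lista})
-- ===== Notes on version B (the rewrite author's own statement) =====
-- stated objective: simpler
-- what changed: Removes the Stack class and the push/pop double pass: B builds the set of discoverers directly in a single forward set comprehension.
import Mathlib
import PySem

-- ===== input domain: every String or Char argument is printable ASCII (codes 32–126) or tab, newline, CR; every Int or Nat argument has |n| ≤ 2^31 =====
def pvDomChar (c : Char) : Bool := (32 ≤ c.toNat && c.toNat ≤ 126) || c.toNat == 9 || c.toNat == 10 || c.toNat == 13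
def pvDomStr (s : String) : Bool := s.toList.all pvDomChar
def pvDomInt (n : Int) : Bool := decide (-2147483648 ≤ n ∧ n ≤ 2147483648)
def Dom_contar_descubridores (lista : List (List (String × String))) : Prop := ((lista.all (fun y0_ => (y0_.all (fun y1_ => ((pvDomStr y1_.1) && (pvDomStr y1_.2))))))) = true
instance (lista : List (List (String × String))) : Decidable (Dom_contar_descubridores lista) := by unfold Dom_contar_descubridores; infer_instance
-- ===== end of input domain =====

-- B drops the Stack class and its push/pop double pass and builds the set of discoverers in one
-- forward set comprehension (objective: simpler). Pre_ excludes dinosaurs without the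
-- "descubridor" key, on which both Pythons raise KeyError.

-- ===== PORT A =====
-- dinosaurio["descubridor"] : none = KeyError
def pvLookupA (d : List (String × String)) : Option String :=
  PySem.Dict.get? (PySem.Dict.mk d) "descubridor"

-- the while-loop: pop from the stack (= traverse lista.reverse), add to the set; none propagates KeyError
def pvWhileA : List (List (String × String)) → PySem.Set String → Option (PySem.Set String)
  | [], descubridores => some descubridores
  | dinosaurio :: rest, descubridores =>
      match pvLookupA dinosaurio with
      | none => none
      | some v => pvWhileA rest (PySem.Set.add descubridores v)

def contar_descubridores (lista : List (List (String × String))) : Int :=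
  -- pila after the push loop holds lista; popping yields lista.reverse
  match pvWhileA lista.reverse PySem.Set.empty with
  | some descubridores => (descubridores.length : Int)
  | none => 0   -- unreachable under Pre_ (KeyError in Python)

-- ===== PORT B =====
-- {d["descubridor"] for d in lista}: collect all values (none = KeyError), then the set's size
def pvValsB : List (List (String × String)) → Option (List String)
  | [] => some []
  | dinosaurio :: rest =>
      match PySem.Dict.get? (PySem.Dict.mk dinosaurio) "descubridor", pvValsB rest with
      | some v, some vs => some (v :: vs)
      | _, _ => none

def contar_descubridores_alt (lista : List (List (String × String))) : Int :=
  match pvValsB lista with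
  | some vs => ((PySem.Set.ofList vs).length : Int)
  | none => 0   -- unreachable under Pre_ (KeyError in Python)

-- ===== PRECONDITION & SPEC =====
-- Pre_ excludes inputs where some dinosaur lacks the "descubridor" key: both Pythons raise KeyError there.
def Pre_contar_descubridores (lista : List (List (String × String))) : Prop :=
  ∀ d ∈ lista, "descubridor" ∈ d.map Prod.fst
instance (lista : List (List (String × String))) : Decidable (Pre_contar_descubridores lista) := by
  unfold Pre_contar_descubridores; infer_instance

def pvWitness_contar_descubridores : (List (List (String × String))) :=
  [[("descubridor", "Anning")], [("descubridor", "Owen"), ("era", "Jurassic")], [("descubridor", "Anning")]]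

def Spec_contar_descubridores (lista : List (List (String × String))) (out : Int) : Prop := out = contar_descubridores_alt lista
instance (lista : List (List (String × String))) (out : Int) : Decidable (Spec_contar_descubridores lista out) := by unfold Spec_contar_descubridores; infer_instance

-- ===== CLAIM (what is proved, stated in full; the proofs are below) =====
def Claim_equal_contar_descubridores : Prop := ∀ (lista : List (List (String × String))), Dom_contar_descubridores lista → Pre_contar_descubridores lista → Spec_contar_descubridores lista (contar_descubridores lista)

-- ===== LEMMAS AND PROOFS =====

theorem pvLookup_isSome {d : List (String × String)}
    (h : "descubridor" ∈ d.map Prod.fst) : (pvLookupA d).isSome := by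
  induction d with
  | nil => simp at h
  | cons p rest ih =>
      obtain ⟨k, v⟩ := p
      simp only [List.map_cons, List.mem_cons] at h
      by_cases hp : k == "descubridor"
      · simp [pvLookupA, PySem.Dict.get?_mk_cons, hp]
      · have : "descubridor" ∈ rest.map Prod.fst := by
          rcases h with h | h
          · exact absurd (by simp [h]) hp
          · exact h
        have := ih this
        simpa [pvLookupA, PySem.Dict.get?_mk_cons, hp] using this

-- under Pre_, the while-loop is a fold of Set.add over the looked-up values
theorem pvWhileA_eq (ds : List (List (String × String)))
    (h : ∀ d ∈ ds, "descubridor" ∈ d.map Prod.fst) (s : PySem.Set String) :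
    pvWhileA ds s = some ((ds.map (fun d => (pvLookupA d).getD "")).foldl PySem.Set.add s) := by
  induction ds generalizing s with
  | nil => rfl
  | cons d rest ih =>
      have hd := pvLookup_isSome (h d (by simp))
      obtain ⟨v, hv⟩ := Option.isSome_iff_exists.mp hd
      simp only [pvWhileA, hv, List.map_cons, List.foldl_cons, Option.getD_some]
      exact ih (fun x hx => h x (by simp [hx])) _

-- under Pre_, B's value collection succeeds and yields exactly the looked-up values
theorem pvValsB_eq (ds : List (List (String × String)))
    (h : ∀ d ∈ ds, "descubridor" ∈ d.map Prod.fst) :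
    pvValsB ds = some (ds.map (fun d => (pvLookupA d).getD "")) := by
  induction ds with
  | nil => rfl
  | cons d rest ih =>
      have hd := pvLookup_isSome (h d (by simp))
      obtain ⟨v, hv⟩ := Option.isSome_iff_exists.mp hd
      have hrest := ih (fun x hx => h x (by simp [hx]))
      simp only [pvValsB, pvLookupA] at *
      simp [hv, hrest]

-- two nodup lists with the same members have the same length
theorem length_eq_of_nodup_of_mem_iff {l₁ l₂ : List String}
    (h₁ : l₁.Nodup) (h₂ : l₂.Nodup) (hm : ∀ x, x ∈ l₁ ↔ x ∈ l₂) :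
    l₁.length = l₂.length := by
  rw [← List.toFinset_card_of_nodup h₁, ← List.toFinset_card_of_nodup h₂]
  congr 1
  ext x
  simpa using hm x

theorem ofList_reverse_length (vs : List String) :
    (PySem.Set.ofList vs.reverse).length = (PySem.Set.ofList vs).length := by
  refine length_eq_of_nodup_of_mem_iff (PySem.Set.nodup_ofList _) (PySem.Set.nodup_ofList _) ?_
  intro x
  simp [PySem.Set.mem_ofList]

-- ===== VERDICT (by name: the statement is the Claim_ definition above) =====
theorem contar_descubridores_spec : Claim_equal_contar_descubridores := by
  intro lista _ hpre
  unfold Spec_contar_descubridores contar_descubridores contar_descubridores_alt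
  have hA := pvWhileA_eq lista.reverse (fun d hd => hpre d (List.mem_reverse.mp hd)) PySem.Set.empty
  have hB := pvValsB_eq lista hpre
  rw [hA, hB]
  have : (lista.reverse.map (fun d => (pvLookupA d).getD "")).foldl PySem.Set.add PySem.Set.empty
      = PySem.Set.ofList ((lista.map (fun d => (pvLookupA d).getD "")).reverse) := by
    rw [PySem.Set.ofList_eq_foldl, List.map_reverse]; rfl
  simp only [this]
  norm_cast
  exact ofList_reverse_length _
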